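-- pv_equiv track=rewrite | github.com/RAZSu/ALGORITMIZALAS_ES_ADATSZERKEZETEK | KOLLOKVIUM/telikerekparverseny.py | max_teli_kerekparverseny
-- ===== SOURCE A (Python) =====
-- def max_teli_kerekparverseny(N, M, K, magassagok):
--     iranyok = [(0, 1, 'J'), (1, 0, 'L')]  # Jobbra és lefelé mozgás
--     dp = [[0] * M for _ in range(N)]  # Maximális hossz tárolása
--     szulo = [[None] * M for _ in range(N)]  # Útvonal visszakövetése
--
--     # Dinamikus programozás a táblázat feltöltéséhez
--     for i in range(N):
--         for j in range(M):
--             for di, dj, lep in iranyok: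
--                 ni, nj = i - di, j - dj
--                 if 0 <= ni < N and 0 <= nj < M and abs(magassagok[i][j] - magassagok[ni][nj]) <= K:
--                     if dp[ni][nj] + 1 > dp[i][j]:
--                         dp[i][j] = dp[ni][nj] + 1
--                         szulo[i][j] = (ni, nj, lep)
--
--     # Maximum hossz keresése
--     max_hossz = 0
--     vegpont = None
--     for i in range(N):
--         for j in range(M):
--             if dp[i][j] > max_hossz:
--                 max_hossz = dp[i][j]
--                 vegpont = (i, j)
--
--     # Útvonal visszakövetése
--     utvonal = []
--     jelenlegi = vegpont
--     while jelenlegi: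
--         ni, nj, lep = szulo[jelenlegi[0]][jelenlegi[1]] if szulo[jelenlegi[0]][jelenlegi[1]] else (None, None, None)
--         if lep:
--             utvonal.append(lep)
--         jelenlegi = (ni, nj) if ni is not None and nj is not None else None
--
--     # Kiírás
--     kezdo_pont = vegpont
--     for lep in utvonal[::-1]:
--         if lep == 'L':
--             kezdo_pont = (kezdo_pont[0] - 1, kezdo_pont[1])
--         elif lep == 'J':
--             kezdo_pont = (kezdo_pont[0], kezdo_pont[1] - 1)
--
--     return max_hossz, (kezdo_pont[0] + 1, kezdo_pont[1] + 1), ''.join(utvonal[::-1])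
-- ===== SOURCE B (Python) =====
-- def max_teli_kerekparverseny(N, M, K, magassagok):
--     # One DP table of (length, start_cell, path) triples; no parent table, no traceback.
--     best = {}
--     for i in range(N):
--         for j in range(M):
--             cell = (0, (i, j), "")
--             for di, dj, lep in ((0, 1, 'J'), (1, 0, 'L')):
--                 ni, nj = i - di, j - dj
--                 if 0 <= ni and 0 <= nj and abs(magassagok[i][j] - magassagok[ni][nj]) <= K:
--                     plen, pstart, ppath = best[(ni, nj)]
--                     if plen + 1 > cell[0]:
--                         cell = (plen + 1, pstart, ppath + lep)
--             best[(i, j)] = cell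
--     top = best[(0, 0)]
--     for i in range(N):
--         for j in range(M):
--             if best[(i, j)][0] > top[0]:
--                 top = best[(i, j)]
--     hossz, (si, sj), ut = top
--     return hossz, (si + 1, sj + 1), ut
-- ===== Notes on version B (the rewrite author's own statement) =====
-- stated objective: simpler
-- what changed: B keeps one DP table of (length, start_cell, path) triples filled in a single right/down sweep and reads the answer directly off the best cell, instead of A's separate dp and parent tables followed by a parent-pointer traceback loop and a second walk over the reversed path to recover the start cell.
import Mathlib
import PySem

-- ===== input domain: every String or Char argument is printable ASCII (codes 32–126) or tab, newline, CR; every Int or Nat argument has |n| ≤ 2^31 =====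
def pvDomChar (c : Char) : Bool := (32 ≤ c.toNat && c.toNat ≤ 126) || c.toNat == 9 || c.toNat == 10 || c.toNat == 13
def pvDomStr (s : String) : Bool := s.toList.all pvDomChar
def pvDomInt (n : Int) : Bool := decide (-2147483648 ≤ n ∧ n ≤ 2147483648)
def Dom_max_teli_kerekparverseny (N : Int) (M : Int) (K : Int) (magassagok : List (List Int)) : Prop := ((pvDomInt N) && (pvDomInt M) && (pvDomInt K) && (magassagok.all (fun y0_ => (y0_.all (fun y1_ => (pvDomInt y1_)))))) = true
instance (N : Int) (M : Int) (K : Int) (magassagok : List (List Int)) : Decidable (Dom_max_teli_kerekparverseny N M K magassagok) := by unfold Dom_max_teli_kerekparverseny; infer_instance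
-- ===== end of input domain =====

-- B replaces A's dp/parent tables + traceback + start re-walk by one table of
-- (length, start, path) triples read off directly (objective: simpler; not faster).

-- ===== PORT A =====

-- magassagok[i][j]; inside Pre_ the indices are always in range, the default is never used
def pvHget (mg : List (List Int)) (i j : Int) : Int :=
  (PySem.List.pyGet? ((PySem.List.pyGet? mg i).getD []) j).getD 0

-- functional update of a table keyed by a cell (models `dp[i][j] = v` / dict write)
def pvUpd {β : Type} (f : Int × Int → β) (c : Int × Int) (v : β) : Int × Int → β :=
  fun x => if x = c then v else f x

def pvIranyok : List (Int × Int × String) := [(0, 1, "J"), (1, 0, "L")]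

-- body of A's triple loop for one cell (i, j): the `for di, dj, lep in iranyok` loop
def pvStepA (N M K : Int) (mg : List (List Int))
    (st : ((Int × Int) → Int) × ((Int × Int) → Option (Int × Int × String))) (c : Int × Int) :
    ((Int × Int) → Int) × ((Int × Int) → Option (Int × Int × String)) :=
  pvIranyok.foldl (fun st d =>
    let ni := c.1 - d.1
    let nj := c.2 - d.2.1
    if 0 ≤ ni ∧ ni < N ∧ 0 ≤ nj ∧ nj < M ∧ |pvHget mg c.1 c.2 - pvHget mg ni nj| ≤ K then
      if st.1 (ni, nj) + 1 > st.1 c then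
        (pvUpd st.1 c (st.1 (ni, nj) + 1), pvUpd st.2 c (some (ni, nj, d.2.2)))
      else st
    else st) st

-- the two nested `for i in range(N): for j in range(M)` DP loops
def pvFillA (N M K : Int) (mg : List (List Int)) :
    ((Int × Int) → Int) × ((Int × Int) → Option (Int × Int × String)) :=
  (PySem.List.pyRange 0 N 1).foldl (fun st i =>
    (PySem.List.pyRange 0 M 1).foldl (fun st j => pvStepA N M K mg st (i, j)) st)
    ((fun _ => 0), (fun _ => none))

-- the max-search loops (max_hossz, vegpont)
def pvScanA (dp : (Int × Int) → Int) (N M : Int) : Int × Option (Int × Int) :=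
  (PySem.List.pyRange 0 N 1).foldl (fun s i =>
    (PySem.List.pyRange 0 M 1).foldl (fun s j =>
      if dp (i, j) > s.1 then (dp (i, j), some (i, j)) else s) s) (0, none)

-- the `while jelenlegi` traceback; fuel (sum of the endpoint's coordinates + 1) bounds
-- the chain length, which decreases that sum by 1 per step
def pvTraceA (par : (Int × Int) → Option (Int × Int × String)) :
    Nat → Option (Int × Int) → List String
  | 0, _ => []
  | _ + 1, none => []
  | f + 1, some c =>
    match par c with
    | some (ni, nj, lep) => lep :: pvTraceA par f (some (ni, nj))
    | none => []

-- one step of the `for lep in utvonal[::-1]` start-recovery loop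
def pvUndo (p : Int × Int) (lep : String) : Int × Int :=
  if lep = "L" then (p.1 - 1, p.2) else if lep = "J" then (p.1, p.2 - 1) else p

def max_teli_kerekparverseny (N : Int) (M : Int) (K : Int) (magassagok : List (List Int)) :
    Int × (Int × Int) × String :=
  let st := pvFillA N M K magassagok
  let s := pvScanA st.1 N M
  let v := s.2.getD (0, 0)   -- Python raises TypeError when vegpont is None: outside Pre_
  let ut := pvTraceA st.2 ((v.1 + v.2).toNat + 1) s.2
  let kezdo := ut.reverse.foldl pvUndo v
  (s.1, (kezdo.1 + 1, kezdo.2 + 1), ut.reverse.foldl (· ++ ·) "")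

-- ===== PORT B =====

-- body of B's inner loop for one cell: build the cell's (length, start, path) triple
-- and write it into the table (Python dict write best[(i, j)] = cell)
def pvStepB (K : Int) (mg : List (List Int))
    (bB : (Int × Int) → Int × (Int × Int) × String) (c : Int × Int) :
    (Int × Int) → Int × (Int × Int) × String :=
  pvUpd bB c (pvIranyok.foldl (fun cell d =>
    let ni := c.1 - d.1
    let nj := c.2 - d.2.1
    if 0 ≤ ni ∧ 0 ≤ nj ∧ |pvHget mg c.1 c.2 - pvHget mg ni nj| ≤ K then
      if (bB (ni, nj)).1 + 1 > cell.1 then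
        ((bB (ni, nj)).1 + 1, (bB (ni, nj)).2.1, (bB (ni, nj)).2.2 ++ d.2.2)
      else cell
    else cell) (0, c, ""))

def pvFillB (N M K : Int) (mg : List (List Int)) : (Int × Int) → Int × (Int × Int) × String :=
  (PySem.List.pyRange 0 N 1).foldl (fun bB i =>
    (PySem.List.pyRange 0 M 1).foldl (fun bB j => pvStepB K mg bB (i, j)) bB)
    (fun c => (0, c, ""))

def max_teli_kerekparverseny_alt (N : Int) (M : Int) (K : Int) (magassagok : List (List Int)) :
    Int × (Int × Int) × String :=
  let bB := pvFillB N M K magassagok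
  let top := (PySem.List.pyRange 0 N 1).foldl (fun top i =>
    (PySem.List.pyRange 0 M 1).foldl (fun top j =>
      if (bB (i, j)).1 > top.1 then bB (i, j) else top) top) (bB (0, 0))
  (top.1, (top.2.1.1 + 1, top.2.1.2 + 1), top.2.2)

-- ===== PRECONDITION & SPEC =====

-- some adjacent (right/down) pair inside the N×M grid has height difference ≤ K
def pvHasEdge (N M K : Int) (mg : List (List Int)) : Prop :=
  ∃ i < N.toNat, ∃ j < M.toNat,
    ((0 < j ∧ |pvHget mg i j - pvHget mg i ((j : Int) - 1)| ≤ K) ∨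
     (0 < i ∧ |pvHget mg i j - pvHget mg ((i : Int) - 1) j| ≤ K))

-- Pre_ excludes exactly the inputs where Python A raises: grids whose first N rows do not
-- cover N×M (IndexError) and grids with no admissible move, where vegpont stays None and
-- subscripting it raises TypeError.
def Pre_max_teli_kerekparverseny (N : Int) (M : Int) (K : Int) (magassagok : List (List Int)) : Prop :=
  1 ≤ N ∧ 1 ≤ M ∧ N ≤ (magassagok.length : Int) ∧
  (∀ r ∈ magassagok.take N.toNat, M ≤ (r.length : Int)) ∧
  pvHasEdge N M K magassagok

instance (N : Int) (M : Int) (K : Int) (magassagok : List (List Int)) :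
    Decidable (Pre_max_teli_kerekparverseny N M K magassagok) := by
  unfold Pre_max_teli_kerekparverseny pvHasEdge; infer_instance

def pvWitness_max_teli_kerekparverseny : Int × Int × Int × List (List Int) := (1, 2, 0, [[0, 0]])

def Spec_max_teli_kerekparverseny (N : Int) (M : Int) (K : Int) (magassagok : List (List Int))
    (out : Int × (Int × Int) × String) : Prop :=
  out = max_teli_kerekparverseny_alt N M K magassagok

instance (N : Int) (M : Int) (K : Int) (magassagok : List (List Int))
    (out : Int × (Int × Int) × String) : Decidable (Spec_max_teli_kerekparverseny N M K magassagok out) := by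
  unfold Spec_max_teli_kerekparverseny; infer_instance

-- ===== CLAIM (what is proved, stated in full; the proofs are below) =====
def Claim_equal_max_teli_kerekparverseny : Prop := ∀ (N : Int) (M : Int) (K : Int) (magassagok : List (List Int)), Dom_max_teli_kerekparverseny N M K magassagok → Pre_max_teli_kerekparverseny N M K magassagok → Spec_max_teli_kerekparverseny N M K magassagok (max_teli_kerekparverseny N M K magassagok)

-- ===== LEMMAS AND PROOFS =====

-- specification of the traceback data encoded in a parent table: path (start→end order)
-- and start cell of the chain hanging off a cell
def pvPath (par : (Int × Int) → Option (Int × Int × String)) : Nat → (Int × Int) → List String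
  | 0, _ => []
  | f + 1, c =>
    match par c with
    | none => []
    | some (ni, nj, lep) => pvPath par f (ni, nj) ++ [lep]

def pvStart (par : (Int × Int) → Option (Int × Int × String)) : Nat → (Int × Int) → Int × Int
  | 0, c => c
  | f + 1, c =>
    match par c with
    | none => c
    | some (ni, nj, _) => pvStart par f (ni, nj)

def pvFuel (c : Int × Int) : Nat := (c.1 + c.2).toNat + 1

def pvJoin (l : List String) : String := l.foldl (· ++ ·) ""

-- well-formed parent table: every stored parent is the left or upper neighbour, with
-- nonnegative coordinates, tagged by the matching letter
def pvW (par : (Int × Int) → Option (Int × Int × String)) : Prop :=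
  ∀ c ni nj lep, par c = some (ni, nj, lep) →
    0 ≤ ni ∧ 0 ≤ nj ∧
    ((lep = "J" ∧ ni = c.1 ∧ nj = c.2 - 1) ∨ (lep = "L" ∧ ni = c.1 - 1 ∧ nj = c.2))

def pvLt (d c : Int × Int) : Prop := d.1 < c.1 ∨ (d.1 = c.1 ∧ d.2 < c.2)

def pvLe (d c : Int × Int) : Prop := d.1 ≤ c.1 ∧ d.2 ≤ c.2

-- the coupling invariant between A's two tables and B's triple table
def pvInv (dp : (Int × Int) → Int) (par : (Int × Int) → Option (Int × Int × String))
    (bB : (Int × Int) → Int × (Int × Int) × String) : Prop :=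
  pvW par ∧ (∀ d, par d = none → dp d = 0) ∧
  (∀ c, bB c = (dp c, pvStart par (pvFuel c) c, pvJoin (pvPath par (pvFuel c) c)))

lemma pvUpd_self {β : Type} (f : Int × Int → β) (c : Int × Int) (v : β) : pvUpd f c v c = v := by
  simp [pvUpd]

lemma pvUpd_ne {β : Type} (f : Int × Int → β) (c d : Int × Int) (v : β) (h : d ≠ c) :
    pvUpd f c v d = f d := by simp [pvUpd, h]

lemma pvUpd_same {β : Type} (f : Int × Int → β) (c : Int × Int) : pvUpd f c (f c) = f := by
  funext x; by_cases h : x = c <;> simp [pvUpd, h]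

lemma pvUpd_upd {β : Type} (f : Int × Int → β) (c : Int × Int) (v w : β) :
    pvUpd (pvUpd f c v) c w = pvUpd f c w := by
  funext x; by_cases h : x = c <;> simp [pvUpd, h]

lemma pvLt_trans {a b c : Int × Int} (h1 : pvLt a b) (h2 : pvLt b c) : pvLt a c := by
  rcases h1 with h1 | ⟨h1, h1'⟩ <;> rcases h2 with h2 | ⟨h2, h2'⟩ <;>
    simp only [pvLt] at * <;> omega

lemma pvLt_irrefl (c : Int × Int) : ¬ pvLt c c := by simp [pvLt]

lemma pvLt_of_le_lt {e d c : Int × Int} (h1 : pvLe e d) (h2 : pvLt d c) : pvLt e c := by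
  rcases h1 with ⟨h1, h1'⟩; rcases h2 with h2 | ⟨h2, h2'⟩ <;> simp only [pvLt] <;> omega

lemma pvJoin_append (l : List String) (s : String) : pvJoin (l ++ [s]) = pvJoin l ++ s := by
  simp [pvJoin, List.foldl_append]

-- updating the table at a cell none of the ≤-cone of d touches leaves d's chain data alone
lemma pvPath_upd (par : (Int × Int) → Option (Int × Int × String)) (c : Int × Int)
    (v : Option (Int × Int × String)) (hW : pvW par) :
    ∀ f d, (∀ e, pvLe e d → e ≠ c) → pvPath (pvUpd par c v) f d = pvPath par f d := by
  intro f
  induction f with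
  | zero => intro d _; rfl
  | succ f ih =>
    intro d hd
    have hdc : d ≠ c := hd d ⟨le_refl _, le_refl _⟩
    show pvPath _ (f + 1) d = pvPath _ (f + 1) d
    cases hpar : par d with
    | none => simp [pvPath, pvUpd, hdc, hpar]
    | some t =>
      obtain ⟨ni, nj, lep⟩ := t
      have hw := hW d ni nj lep hpar
      have hle : pvLe (ni, nj) d := by
        rcases hw.2.2 with ⟨_, h1, h2⟩ | ⟨_, h1, h2⟩ <;> exact ⟨by omega, by omega⟩
      have := ih (ni, nj) (fun e he => hd e ⟨le_trans he.1 hle.1, le_trans he.2 hle.2⟩)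
      simp [pvPath, pvUpd, hdc, hpar, this]

lemma pvStart_upd (par : (Int × Int) → Option (Int × Int × String)) (c : Int × Int)
    (v : Option (Int × Int × String)) (hW : pvW par) :
    ∀ f d, (∀ e, pvLe e d → e ≠ c) → pvStart (pvUpd par c v) f d = pvStart par f d := by
  intro f
  induction f with
  | zero => intro d _; rfl
  | succ f ih =>
    intro d hd
    have hdc : d ≠ c := hd d ⟨le_refl _, le_refl _⟩
    show pvStart _ (f + 1) d = pvStart _ (f + 1) d
    cases hpar : par d with
    | none => simp [pvStart, pvUpd, hdc, hpar]
    | some t =>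
      obtain ⟨ni, nj, lep⟩ := t
      have hw := hW d ni nj lep hpar
      have hle : pvLe (ni, nj) d := by
        rcases hw.2.2 with ⟨_, h1, h2⟩ | ⟨_, h1, h2⟩ <;> exact ⟨by omega, by omega⟩
      have := ih (ni, nj) (fun e he => hd e ⟨le_trans he.1 hle.1, le_trans he.2 hle.2⟩)
      simp [pvStart, pvUpd, hdc, hpar, this]

-- everything in the ≤-cone of a nonneg parent has a strictly smaller coordinate sum than c
lemma pvCone_ne (c p : Int × Int) (hsum : p.1 + p.2 = c.1 + c.2 - 1) :
    ∀ e, pvLe e p → e ≠ c := by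
  rintro e ⟨h1, h2⟩ rfl; omega

-- one conditional relaxation (one direction of the iranyok loop), table-level form
lemma pvRelax (K : Int) (mg : List (List Int)) (dp : (Int × Int) → Int)
    (par : (Int × Int) → Option (Int × Int × String))
    (bB : (Int × Int) → Int × (Int × Int) × String) (c : Int × Int) (ni nj : Int) (lep : String)
    (hInv : pvInv dp par bB)
    (hord : ∀ d, par d ≠ none → pvLt d c ∨ d = c)
    (hsh : (lep = "J" ∧ ni = c.1 ∧ nj = c.2 - 1) ∨ (lep = "L" ∧ ni = c.1 - 1 ∧ nj = c.2))
    (G : Prop) [Decidable G] (hG : G → 0 ≤ ni ∧ 0 ≤ nj) :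
    pvInv
      (if G then (if dp (ni, nj) + 1 > dp c then pvUpd dp c (dp (ni, nj) + 1) else dp) else dp)
      (if G then (if dp (ni, nj) + 1 > dp c then pvUpd par c (some (ni, nj, lep)) else par) else par)
      (if G then (if (bB (ni, nj)).1 + 1 > (bB c).1 then
          pvUpd bB c ((bB (ni, nj)).1 + 1, (bB (ni, nj)).2.1, (bB (ni, nj)).2.2 ++ lep) else bB) else bB)
    ∧ (∀ d, (if G then (if dp (ni, nj) + 1 > dp c then pvUpd par c (some (ni, nj, lep)) else par) else par) d ≠ none
        → pvLt d c ∨ d = c) := by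
  obtain ⟨hW, hz, hb⟩ := hInv
  by_cases hg : G
  · simp only [if_pos hg]
    have hcmp_eq : ((bB (ni, nj)).1 + 1 > (bB c).1) = (dp (ni, nj) + 1 > dp c) := by
      rw [hb (ni, nj), hb c]
    by_cases hcmp : dp (ni, nj) + 1 > dp c
    · simp only [hcmp_eq, if_pos hcmp]
      have hnn := hG hg
      have hsum : ni + nj = c.1 + c.2 - 1 := by rcases hsh with ⟨_, h1, h2⟩ | ⟨_, h1, h2⟩ <;> omega
      have hpc : (ni, nj) ≠ c := by
        intro h
        have h1 : ni = c.1 := congrArg Prod.fst h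
        have h2 : nj = c.2 := congrArg Prod.snd h
        omega
      have hW' : pvW (pvUpd par c (some (ni, nj, lep))) := by
        intro c' a b l h
        by_cases hc' : c' = c
        · subst hc'
          rw [pvUpd_self] at h
          injection h with h; injection h with h1 h; injection h with h2 h3
          subst h1; subst h2; subst h3
          exact ⟨hnn.1, hnn.2, hsh⟩
        · rw [pvUpd_ne _ _ _ _ hc'] at h
          exact hW c' a b l h
      have havoid : ∀ e, pvLe e (ni, nj) → e ≠ c := pvCone_ne c (ni, nj) hsum
      refine ⟨⟨hW', ?_, ?_⟩, ?_⟩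
      · intro d hd
        by_cases hdc : d = c
        · subst hdc; rw [pvUpd_self] at hd; exact absurd hd (by simp)
        · rw [pvUpd_ne _ _ _ _ hdc] at hd
          rw [pvUpd_ne _ _ _ _ hdc]
          exact hz d hd
      · intro d
        by_cases hdc : d = c
        · subst hdc
          rw [pvUpd_self, pvUpd_self]
          have hfuel : (d.1 + d.2).toNat = pvFuel (ni, nj) := by
            simp only [pvFuel]; omega
          have hstart : pvStart (pvUpd par d (some (ni, nj, lep))) (pvFuel d) d
              = pvStart par (pvFuel (ni, nj)) (ni, nj) := by
            show pvStart _ ((d.1 + d.2).toNat + 1) d = _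
            simp only [pvStart, pvUpd_self]
            rw [hfuel, pvStart_upd par d (some (ni, nj, lep)) hW _ _ havoid]
          have hpath : pvPath (pvUpd par d (some (ni, nj, lep))) (pvFuel d) d
              = pvPath par (pvFuel (ni, nj)) (ni, nj) ++ [lep] := by
            show pvPath _ ((d.1 + d.2).toNat + 1) d = _
            simp only [pvPath, pvUpd_self]
            rw [hfuel, pvPath_upd par d (some (ni, nj, lep)) hW _ _ havoid]
          rw [hstart, hpath, pvJoin_append]
          rw [hb (ni, nj)]
        · rw [pvUpd_ne _ _ _ _ hdc, pvUpd_ne _ _ _ _ hdc, hb d]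
          cases hpar : par d with
          | none =>
            have h1 : pvStart (pvUpd par c (some (ni, nj, lep))) (pvFuel d) d = d := by
              show pvStart _ (_ + 1) d = d
              simp [pvStart, pvUpd, hdc, hpar]
            have h2 : pvPath (pvUpd par c (some (ni, nj, lep))) (pvFuel d) d = [] := by
              show pvPath _ (_ + 1) d = []
              simp [pvPath, pvUpd, hdc, hpar]
            have h1' : pvStart par (pvFuel d) d = d := by
              show pvStart _ (_ + 1) d = d
              simp [pvStart, hpar]
            have h2' : pvPath par (pvFuel d) d = [] := by
              show pvPath _ (_ + 1) d = []
              simp [pvPath, hpar]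
            rw [h1, h2, h1', h2']
          | some t =>
            have hdlt : pvLt d c := by
              rcases hord d (by rw [hpar]; simp) with h | h
              · exact h
              · exact absurd h hdc
            have havoid' : ∀ e, pvLe e d → e ≠ c := by
              intro e he heq
              subst heq
              exact pvLt_irrefl e (pvLt_of_le_lt he hdlt)
            rw [pvStart_upd par c (some (ni, nj, lep)) hW _ _ havoid',
              pvPath_upd par c (some (ni, nj, lep)) hW _ _ havoid']
      · intro d hd
        by_cases hdc : d = c
        · exact Or.inr hdc
        · rw [pvUpd_ne _ _ _ _ hdc] at hd
          exact hord d hd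
    · simp only [hcmp_eq, if_neg hcmp]
      exact ⟨⟨hW, hz, hb⟩, hord⟩
  · simp only [if_neg hg]
    exact ⟨⟨hW, hz, hb⟩, hord⟩

-- processing one cell of the row-major sweep preserves the invariant
lemma pvStep_pres (N M K : Int) (mg : List (List Int)) (dp : (Int × Int) → Int)
    (par : (Int × Int) → Option (Int × Int × String))
    (bB : (Int × Int) → Int × (Int × Int) × String) (c : Int × Int)
    (hInv : pvInv dp par bB)
    (hord : ∀ d, par d ≠ none → pvLt d c)
    (hb : 0 ≤ c.1 ∧ c.1 < N ∧ 0 ≤ c.2 ∧ c.2 < M) :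
    pvInv (pvStepA N M K mg (dp, par) c).1 (pvStepA N M K mg (dp, par) c).2 (pvStepB K mg bB c)
    ∧ (∀ d, (pvStepA N M K mg (dp, par) c).2 d ≠ none → pvLt d c ∨ d = c) := by
  have hcnone : par c = none := by
    cases hpar : par c with
    | none => rfl
    | some t => exact absurd (hord c (by rw [hpar]; simp)) (pvLt_irrefl c)
  have hdpc : dp c = 0 := hInv.2.1 c hcnone
  have hbc : bB c = (0, c, "") := by
    have := hInv.2.2 c
    have h1 : pvStart par (pvFuel c) c = c := by
      show pvStart _ (_ + 1) c = c; simp [pvStart, hcnone]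
    have h2 : pvPath par (pvFuel c) c = [] := by
      show pvPath _ (_ + 1) c = []; simp [pvPath, hcnone]
    rw [this, h1, h2, hdpc]; rfl
  -- guard equivalences between A's and B's conditions
  have hg1 : (0 ≤ c.1 - 0 ∧ c.1 - 0 < N ∧ 0 ≤ c.2 - 1 ∧ c.2 - 1 < M ∧
      |pvHget mg c.1 c.2 - pvHget mg (c.1 - 0) (c.2 - 1)| ≤ K)
      ↔ (0 ≤ c.1 - 0 ∧ 0 ≤ c.2 - 1 ∧ |pvHget mg c.1 c.2 - pvHget mg (c.1 - 0) (c.2 - 1)| ≤ K) := by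
    constructor
    · rintro ⟨h1, _, h3, _, h5⟩; exact ⟨h1, h3, h5⟩
    · rintro ⟨h1, h3, h5⟩; exact ⟨h1, by omega, h3, by omega, h5⟩
  have hg2 : (0 ≤ c.1 - 1 ∧ c.1 - 1 < N ∧ 0 ≤ c.2 - 0 ∧ c.2 - 0 < M ∧
      |pvHget mg c.1 c.2 - pvHget mg (c.1 - 1) (c.2 - 0)| ≤ K)
      ↔ (0 ≤ c.1 - 1 ∧ 0 ≤ c.2 - 0 ∧ |pvHget mg c.1 c.2 - pvHget mg (c.1 - 1) (c.2 - 0)| ≤ K) := by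
    constructor
    · rintro ⟨h1, _, h3, _, h5⟩; exact ⟨h1, h3, h5⟩
    · rintro ⟨h1, h3, h5⟩; exact ⟨h1, by omega, h3, by omega, h5⟩
  set G1 : Prop := 0 ≤ c.1 - 0 ∧ 0 ≤ c.2 - 1 ∧ |pvHget mg c.1 c.2 - pvHget mg (c.1 - 0) (c.2 - 1)| ≤ K with hG1def
  set G2 : Prop := 0 ≤ c.1 - 1 ∧ 0 ≤ c.2 - 0 ∧ |pvHget mg c.1 c.2 - pvHget mg (c.1 - 1) (c.2 - 0)| ≤ K with hG2def
  -- step A unfolded to two table-level relaxations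
  have hA : pvStepA N M K mg (dp, par) c =
      (let dp1 := if G1 then (if dp (c.1 - 0, c.2 - 1) + 1 > dp c then pvUpd dp c (dp (c.1 - 0, c.2 - 1) + 1) else dp) else dp
       let par1 := if G1 then (if dp (c.1 - 0, c.2 - 1) + 1 > dp c then pvUpd par c (some (c.1 - 0, c.2 - 1, "J")) else par) else par
       ((if G2 then (if dp1 (c.1 - 1, c.2 - 0) + 1 > dp1 c then pvUpd dp1 c (dp1 (c.1 - 1, c.2 - 0) + 1) else dp1) else dp1),
        (if G2 then (if dp1 (c.1 - 1, c.2 - 0) + 1 > dp1 c then pvUpd par1 c (some (c.1 - 1, c.2 - 0, "L")) else par1) else par1))) := by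
    simp only [pvStepA, pvIranyok, List.foldl_cons, List.foldl_nil]
    rw [if_congr hg1 rfl rfl, if_congr hg2 rfl rfl]
    by_cases h1 : G1 <;> by_cases h2 : dp (c.1 - 0, c.2 - 1) + 1 > dp c <;>
      simp only [h1, h2, ite_true, ite_false] <;>
      (try dsimp only) <;>
      split_ifs <;> rfl
  -- step B unfolded to two table-level relaxations
  have hB : pvStepB K mg bB c =
      (let bB1 := if G1 then (if (bB (c.1 - 0, c.2 - 1)).1 + 1 > (bB c).1 then
          pvUpd bB c ((bB (c.1 - 0, c.2 - 1)).1 + 1, (bB (c.1 - 0, c.2 - 1)).2.1, (bB (c.1 - 0, c.2 - 1)).2.2 ++ "J") else bB) else bB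
       (if G2 then (if (bB1 (c.1 - 1, c.2 - 0)).1 + 1 > (bB1 c).1 then
          pvUpd bB1 c ((bB1 (c.1 - 1, c.2 - 0)).1 + 1, (bB1 (c.1 - 1, c.2 - 0)).2.1, (bB1 (c.1 - 1, c.2 - 0)).2.2 ++ "L") else bB1) else bB1)) := by
    have hp2 : (c.1 - 1, c.2 - 0) ≠ c := by
      intro h
      have h2 : c.1 - 1 = c.1 := congrArg Prod.fst h
      omega
    simp only [pvStepB, pvIranyok, List.foldl_cons, List.foldl_nil]
    have hbc1 : (bB c).1 = 0 := by rw [hbc]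
    simp only [hbc1]
    by_cases h1 : G1 <;> by_cases h2 : (bB (c.1 - 0, c.2 - 1)).1 + 1 > 0 <;>
      simp only [h1, h2, ite_true, ite_false] <;>
      (try simp only [pvUpd_ne _ _ _ _ hp2, pvUpd_self, hbc1]) <;>
      (try dsimp only) <;>
      split_ifs <;>
      first
        | rfl
        | rw [pvUpd_upd]
        | (rw [← hbc]; rw [pvUpd_same])
        | (exfalso; (try dsimp only at *); (try simp only [hbc1] at *); omega)
  rw [hA, hB]
  have hord' : ∀ d, par d ≠ none → pvLt d c ∨ d = c := fun d hd => Or.inl (hord d hd)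
  have r1 := pvRelax K mg dp par bB c (c.1 - 0) (c.2 - 1) "J" ⟨hInv.1, hInv.2.1, hInv.2.2⟩ hord'
    (Or.inl ⟨rfl, by omega, by omega⟩) G1
    (fun hg => ⟨hg.1, hg.2.1⟩)
  have r2 := pvRelax K mg
    (if G1 then (if dp (c.1 - 0, c.2 - 1) + 1 > dp c then pvUpd dp c (dp (c.1 - 0, c.2 - 1) + 1) else dp) else dp)
    (if G1 then (if dp (c.1 - 0, c.2 - 1) + 1 > dp c then pvUpd par c (some (c.1 - 0, c.2 - 1, "J")) else par) else par)
    (if G1 then (if (bB (c.1 - 0, c.2 - 1)).1 + 1 > (bB c).1 then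
        pvUpd bB c ((bB (c.1 - 0, c.2 - 1)).1 + 1, (bB (c.1 - 0, c.2 - 1)).2.1, (bB (c.1 - 0, c.2 - 1)).2.2 ++ "J") else bB) else bB)
    c (c.1 - 1) (c.2 - 0) "L" r1.1 r1.2
    (Or.inr ⟨rfl, by omega, by omega⟩) G2
    (fun hg => ⟨hg.1, hg.2.1⟩)
  exact r2

-- the whole sweep over a row-major sorted list of in-bounds cells
lemma pvFill_inv (N M K : Int) (mg : List (List Int)) :
    ∀ (cs : List (Int × Int)) (dp : (Int × Int) → Int)
      (par : (Int × Int) → Option (Int × Int × String))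
      (bB : (Int × Int) → Int × (Int × Int) × String),
      pvInv dp par bB →
      (∀ c ∈ cs, 0 ≤ c.1 ∧ c.1 < N ∧ 0 ≤ c.2 ∧ c.2 < M) →
      cs.Pairwise pvLt →
      (∀ d, par d ≠ none → ∀ c ∈ cs, pvLt d c) →
      pvInv (cs.foldl (pvStepA N M K mg) (dp, par)).1 (cs.foldl (pvStepA N M K mg) (dp, par)).2
        (cs.foldl (pvStepB K mg) bB) := by
  intro cs
  induction cs with
  | nil => intro dp par bB hInv _ _ _; exact hInv
  | cons c cs ih =>
    intro dp par bB hInv hbd hpw hord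
    have hstep := pvStep_pres N M K mg dp par bB c hInv
      (fun d hd => hord d hd c (List.mem_cons_self)) (hbd c List.mem_cons_self)
    simp only [List.foldl_cons]
    have hA : cs.foldl (pvStepA N M K mg) (pvStepA N M K mg (dp, par) c)
        = cs.foldl (pvStepA N M K mg) ((pvStepA N M K mg (dp, par) c).1, (pvStepA N M K mg (dp, par) c).2) := by rfl
    rw [hA]
    apply ih _ _ _ hstep.1 (fun c' hc' => hbd c' (List.mem_cons_of_mem _ hc')) hpw.of_cons
    intro d hd c' hc'
    have hcc' : pvLt c c' := (List.rel_of_pairwise_cons hpw) hc'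
    rcases hstep.2 d hd with h | h
    · exact pvLt_trans h hcc'
    · subst h; exact hcc'

def pvCells (N M : Int) : List (Int × Int) :=
  (PySem.List.pyRange 0 N 1).flatMap (fun i => (PySem.List.pyRange 0 M 1).map (fun j => (i, j)))

lemma pvFoldl_nested {σ : Type} (f : σ → Int × Int → σ) (xs ys : List Int) (init : σ) :
    xs.foldl (fun s i => ys.foldl (fun s j => f s (i, j)) s) init
      = (xs.flatMap (fun i => ys.map (fun j => (i, j)))).foldl f init := by
  induction xs generalizing init with
  | nil => rfl
  | cons x xs ih => simp [List.flatMap_cons, List.foldl_append, List.foldl_map, ih]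

lemma pvCells_bounds (N M : Int) : ∀ c ∈ pvCells N M, 0 ≤ c.1 ∧ c.1 < N ∧ 0 ≤ c.2 ∧ c.2 < M := by
  intro c hc
  simp only [pvCells, List.mem_flatMap, List.mem_map] at hc
  obtain ⟨i, hi, j, hj, rfl⟩ := hc
  rw [PySem.List.mem_pyRange_one] at hi hj
  exact ⟨hi.1, hi.2, hj.1, hj.2⟩

lemma pvCells_pairwise (N M : Int) : (pvCells N M).Pairwise pvLt := by
  unfold pvCells
  rw [List.pairwise_flatMap]
  constructor
  · intro i _
    apply List.Pairwise.map
    · intro a b hab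
      exact Or.inr ⟨rfl, hab⟩
    · exact PySem.List.pairwise_lt_pyRange_one 0 M
  · apply List.Pairwise.imp ?_ (PySem.List.pairwise_lt_pyRange_one 0 N)
    intro a b hab
    intro x hx y hy
    simp only [List.mem_map] at hx hy
    obtain ⟨j1, _, rfl⟩ := hx
    obtain ⟨j2, _, rfl⟩ := hy
    exact Or.inl hab

-- the two max-scans stay coupled
lemma pvScan_rel (dp : (Int × Int) → Int) (bB : (Int × Int) → Int × (Int × Int) × String)
    (h1 : ∀ c, (bB c).1 = dp c) (h00 : (bB (0, 0)).1 = 0) :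
    ∀ (cs : List (Int × Int)) (s : Int × Option (Int × Int)) (t : Int × (Int × Int) × String),
      (s.2 = none → s.1 = 0 ∧ t = bB (0, 0)) →
      (∀ v, s.2 = some v → t = bB v ∧ s.1 = (bB v).1) →
      ((cs.foldl (fun s c => if dp c > s.1 then (dp c, some c) else s) s).2 = none →
        (cs.foldl (fun s c => if dp c > s.1 then (dp c, some c) else s) s).1 = 0 ∧
        cs.foldl (fun t c => if (bB c).1 > t.1 then bB c else t) t = bB (0, 0)) ∧
      (∀ v, (cs.foldl (fun s c => if dp c > s.1 then (dp c, some c) else s) s).2 = some v →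
        cs.foldl (fun t c => if (bB c).1 > t.1 then bB c else t) t = bB v ∧
        (cs.foldl (fun s c => if dp c > s.1 then (dp c, some c) else s) s).1 = (bB v).1) := by
  intro cs
  induction cs with
  | nil => intro s t hn hs; exact ⟨hn, hs⟩
  | cons c cs ih =>
    intro s t hn hs
    simp only [List.foldl_cons]
    have ht1 : t.1 = s.1 := by
      cases hv : s.2 with
      | none => rw [(hn hv).1, (hn hv).2, h00]
      | some v => rw [(hs v hv).1, (hs v hv).2]
    have hcond : ((bB c).1 > t.1) = (dp c > s.1) := by rw [h1 c, ht1]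
    by_cases hc : dp c > s.1
    · simp only [hcond, hc, ite_true]
      apply ih
      · intro h; exact absurd h (by simp)
      · intro v hv
        have hv' : c = v := by simpa using hv
        subst hv'
        exact ⟨rfl, (h1 c).symm⟩
    · simp only [hcond, hc, ite_false]
      exact ih s t hn hs

lemma pvTrace_reverse (par : (Int × Int) → Option (Int × Int × String)) :
    ∀ f c, (pvTraceA par f (some c)).reverse = pvPath par f c := by
  intro f
  induction f with
  | zero => intro c; rfl
  | succ f ih =>
    intro c
    cases hpar : par c with
    | none => simp [pvTraceA, pvPath, hpar]
    | some t =>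
      obtain ⟨ni, nj, lep⟩ := t
      simp [pvTraceA, pvPath, hpar, ih (ni, nj)]

lemma pvFoldl_undo (l : List String) :
    ∀ x : Int × Int, l.foldl pvUndo x = (x.1 - (l.count "L" : Int), x.2 - (l.count "J" : Int)) := by
  induction l with
  | nil => intro x; simp
  | cons a l ih =>
    intro x
    simp only [List.foldl_cons, ih, List.count_cons]
    by_cases hL : a = "L"
    · subst hL
      simp [pvUndo, Prod.ext_iff]
      all_goals (push_cast; ring)
    · by_cases hJ : a = "J"
      · subst hJ
        have : ("L" == "J") = false := by decide
        simp [pvUndo, this, Prod.ext_iff]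
        all_goals (push_cast; ring)
      · have h1 : ("L" == a) = false := by
          simp [beq_iff_eq]; exact fun h => hL h.symm
        have h2 : ("J" == a) = false := by
          simp [beq_iff_eq]; exact fun h => hJ h.symm
        simp [pvUndo, hL, hJ, h1, h2]

lemma pvStart_count (par : (Int × Int) → Option (Int × Int × String)) (hW : pvW par) :
    ∀ f c, pvStart par f c
      = (c.1 - ((pvPath par f c).count "L" : Int), c.2 - ((pvPath par f c).count "J" : Int)) := by
  intro f
  induction f with
  | zero => intro c; simp [pvStart, pvPath]
  | succ f ih =>
    intro c
    cases hpar : par c with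
    | none => simp [pvStart, pvPath, hpar]
    | some t =>
      obtain ⟨ni, nj, lep⟩ := t
      have hw := hW c ni nj lep hpar
      simp only [pvStart, pvPath, hpar, ih (ni, nj), List.count_append]
      rcases hw.2.2 with ⟨hl, h1, h2⟩ | ⟨hl, h1, h2⟩ <;> subst hl <;> subst h1 <;> subst h2
      · have c1 : ([("J" : String)].count "L") = 0 := by decide
        have c2 : ([("J" : String)].count "J") = 1 := by decide
        rw [c1, c2, Prod.ext_iff]
        constructor <;> push_cast <;> ring
      · have c1 : ([("L" : String)].count "L") = 1 := by decide
        have c2 : ([("L" : String)].count "J") = 0 := by decide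
        rw [c1, c2, Prod.ext_iff]
        constructor <;> push_cast <;> ring

-- main equality, no hypotheses needed: the two Lean ports agree everywhere
lemma pvMain_eq (N M K : Int) (mg : List (List Int)) :
    max_teli_kerekparverseny N M K mg = max_teli_kerekparverseny_alt N M K mg := by
  -- rewrite both fills as folds over the row-major cell list
  have hfillA : pvFillA N M K mg = (pvCells N M).foldl (pvStepA N M K mg) ((fun _ => 0), (fun _ => none)) := by
    unfold pvFillA pvCells
    exact pvFoldl_nested (pvStepA N M K mg) _ _ _
  have hfillB : pvFillB N M K mg = (pvCells N M).foldl (pvStepB K mg) (fun c => (0, c, "")) := by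
    unfold pvFillB pvCells
    exact pvFoldl_nested (pvStepB K mg) _ _ _
  have hInv0 : pvInv (fun _ => (0 : Int)) (fun _ => none) (fun c => (0, c, "")) := by
    refine ⟨fun c ni nj lep h => by simp at h, fun d _ => rfl, fun c => ?_⟩
    have h1 : pvStart (fun _ => none) (pvFuel c) c = c := by
      show pvStart _ (_ + 1) c = c; simp [pvStart]
    have h2 : pvPath (fun _ => none) (pvFuel c) c = [] := by
      show pvPath _ (_ + 1) c = []; simp [pvPath]
    rw [h1, h2]; rfl
  have hInv := pvFill_inv N M K mg (pvCells N M) _ _ _ hInv0 (pvCells_bounds N M)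
    (pvCells_pairwise N M) (fun d hd => absurd rfl hd)
  rw [← hfillA, ← hfillB] at hInv
  obtain ⟨hW, hz, hb⟩ := hInv
  set dp := (pvFillA N M K mg).1 with hdp
  set par := (pvFillA N M K mg).2 with hpar
  set bB := pvFillB N M K mg with hbB
  -- (0,0) has no parent, so dp (0,0) = 0 and bB (0,0) = (0,(0,0),"")
  have h00par : par (0, 0) = none := by
    cases hp : par (0, 0) with
    | none => rfl
    | some t =>
      obtain ⟨ni, nj, lep⟩ := t
      have hw := hW (0, 0) ni nj lep hp
      rcases hw.2.2 with ⟨_, h1, h2⟩ | ⟨_, h1, h2⟩ <;> simp at h1 h2 <;> omega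
  have h00dp : dp (0, 0) = 0 := hz (0, 0) h00par
  have h00b : bB (0, 0) = (0, (0, 0), "") := by
    have := hb (0, 0)
    have h1 : pvStart par (pvFuel (0, 0)) (0, 0) = (0, 0) := by
      show pvStart _ (_ + 1) (0, 0) = (0, 0); simp [pvStart, h00par]
    have h2 : pvPath par (pvFuel (0, 0)) (0, 0) = [] := by
      show pvPath _ (_ + 1) (0, 0) = []; simp [pvPath, h00par]
    rw [this, h1, h2, h00dp]; rfl
  have h1c : ∀ c, (bB c).1 = dp c := fun c => by rw [hb c]
  -- couple the two max-scans
  have hscanA : pvScanA dp N M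
      = (pvCells N M).foldl (fun s c => if dp c > s.1 then (dp c, some c) else s) (0, none) := by
    unfold pvScanA pvCells
    exact pvFoldl_nested (fun s c => if dp c > s.1 then (dp c, some c) else s) _ _ _
  have hscanB :
      (PySem.List.pyRange 0 N 1).foldl (fun top i =>
        (PySem.List.pyRange 0 M 1).foldl (fun top j =>
          if (bB (i, j)).1 > top.1 then bB (i, j) else top) top) (bB (0, 0))
      = (pvCells N M).foldl (fun t c => if (bB c).1 > t.1 then bB c else t) (bB (0, 0)) := by
    unfold pvCells
    exact pvFoldl_nested (fun t c => if (bB c).1 > t.1 then bB c else t) _ _ _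
  have hrel := pvScan_rel dp bB h1c (by rw [h00b]) (pvCells N M) (0, none) (bB (0, 0))
    (fun _ => ⟨rfl, rfl⟩) (fun v hv => by simp at hv)
  show (let st := pvFillA N M K mg
        let s := pvScanA st.1 N M
        let v := s.2.getD (0, 0)
        let ut := pvTraceA st.2 ((v.1 + v.2).toNat + 1) s.2
        let kezdo := ut.reverse.foldl pvUndo v
        (s.1, (kezdo.1 + 1, kezdo.2 + 1), ut.reverse.foldl (· ++ ·) "")) = _
  show _ = (let bBl := pvFillB N M K mg
        let top := (PySem.List.pyRange 0 N 1).foldl (fun top i =>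
          (PySem.List.pyRange 0 M 1).foldl (fun top j =>
            if (bBl (i, j)).1 > top.1 then bBl (i, j) else top) top) (bBl (0, 0))
        (top.1, (top.2.1.1 + 1, top.2.1.2 + 1), top.2.2))
  simp only [← hdp, ← hpar, ← hbB, hscanA, hscanB]
  set s' := (pvCells N M).foldl (fun s c => if dp c > s.1 then (dp c, some c) else s) (0, none) with hs'
  set t' := (pvCells N M).foldl (fun t c => if (bB c).1 > t.1 then bB c else t) (bB (0, 0)) with ht'
  cases hveg : s'.2 with
  | none =>
    obtain ⟨hmx, htop⟩ := hrel.1 hveg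
    have htr : pvTraceA par ((((0 : Int), (0 : Int)).1 + ((0 : Int), (0 : Int)).2).toNat + 1) none = [] := rfl
    simp only [hveg, Option.getD, htr]
    rw [htop, h00b, hmx]
    simp
  | some v =>
    obtain ⟨htop, hmx⟩ := hrel.2 v hveg
    simp only [hveg, Option.getD]
    have hrev : (pvTraceA par ((v.1 + v.2).toNat + 1) (some v)).reverse
        = pvPath par (pvFuel v) v := pvTrace_reverse par (pvFuel v) v
    rw [htop, hb v, hrev]
    have hstart := pvStart_count par hW (pvFuel v) v
    have hundo := pvFoldl_undo (pvPath par (pvFuel v) v) v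
    rw [hundo, hstart, hmx, hb v]
    have hjoin : ∀ l : List String, l.foldl (· ++ ·) "" = pvJoin l := fun l => rfl
    rw [hjoin]

-- ===== VERDICT (by name: the statement is the Claim_ definition above) =====
theorem max_teli_kerekparverseny_spec : Claim_equal_max_teli_kerekparverseny := by
  intro N M K mg _ _
  show max_teli_kerekparverseny N M K mg = max_teli_kerekparverseny_alt N M K mg
  exact pvMain_eq N M K mg
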